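-- pv_equiv track=rewrite | github.com/neep305/adobe-code-cli | src/adobe_experience/agent/schema_wizard_orchestrator.py | _infer_primary_identity
-- ===== SOURCE A (Python) =====
-- from typing import Any, Callable, Coroutine, Dict, List, Optional
--
-- def _infer_primary_identity(field_names: List[str], cls: str) -> Optional[Dict[str, str]]:
--     if cls == "experienceevent":
--         for fn in field_names:
--             if "ecid" in fn:
--                 return {"field": fn, "namespace": "ECID"}
--     for fn in field_names:
--         if "email" in fn:
--             return {"field": fn, "namespace": "Email"}
--     for fn in field_names:
--         if "crm" in fn or "customer_id" in fn or "user_id" in fn: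
--             return {"field": fn, "namespace": "CRM_ID"}
--     return None
-- ===== SOURCE B (Python) =====
-- from typing import Dict, List, Optional
--
-- def _infer_primary_identity(field_names: List[str], cls: str) -> Optional[Dict[str, str]]:
--     # One pass: record the first field of each identity kind, then select by priority.
--     first_ecid = None
--     first_email = None
--     first_crm = None
--     for fn in field_names:
--         if first_ecid is None and "ecid" in fn:
--             first_ecid = fn
--         if first_email is None and "email" in fn:
--             first_email = fn
--         if first_crm is None and ("crm" in fn or "customer_id" in fn or "user_id" in fn):
--             first_crm = fn
--     if cls == "experienceevent" and first_ecid is not None: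
--         return {"field": first_ecid, "namespace": "ECID"}
--     if first_email is not None:
--         return {"field": first_email, "namespace": "Email"}
--     if first_crm is not None:
--         return {"field": first_crm, "namespace": "CRM_ID"}
--     return None
-- ===== Notes on version B (the rewrite author's own statement) =====
-- stated objective: alternative
-- what changed: Replaces up to three separate scans over field_names with a single pass that records the first ecid/email/crm-like field in three slots, followed by a fixed priority-order selection.
import Mathlib
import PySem

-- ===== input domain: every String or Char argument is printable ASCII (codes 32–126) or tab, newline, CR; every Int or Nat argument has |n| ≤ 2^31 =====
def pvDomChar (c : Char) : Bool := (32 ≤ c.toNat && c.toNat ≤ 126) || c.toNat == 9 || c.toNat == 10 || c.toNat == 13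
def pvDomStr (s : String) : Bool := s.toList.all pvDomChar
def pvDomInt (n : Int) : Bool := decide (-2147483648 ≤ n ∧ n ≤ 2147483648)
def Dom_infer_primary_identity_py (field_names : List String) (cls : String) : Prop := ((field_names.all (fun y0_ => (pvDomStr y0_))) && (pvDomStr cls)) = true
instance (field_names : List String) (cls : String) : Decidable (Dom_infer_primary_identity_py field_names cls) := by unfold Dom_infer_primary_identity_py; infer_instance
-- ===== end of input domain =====

-- B replaces A's three sequential scans by one pass recording first matches plus a priority selection (alternative decomposition, same return value).

-- ===== PORT A =====
def infer_primary_identity_py (field_names : List String) (cls : String) : Option (List (String × String)) :=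
  match (if cls == "experienceevent" then
           field_names.find? (fun fn => PySem.Str.isIn "ecid" fn)
         else none) with
  | some fn => some [("field", fn), ("namespace", "ECID")]
  | none =>
    match field_names.find? (fun fn => PySem.Str.isIn "email" fn) with
    | some fn => some [("field", fn), ("namespace", "Email")]
    | none =>
      match field_names.find? (fun fn => PySem.Str.isIn "crm" fn || PySem.Str.isIn "customer_id" fn || PySem.Str.isIn "user_id" fn) with
      | some fn => some [("field", fn), ("namespace", "CRM_ID")]
      | none => none

-- ===== PORT B =====
def pvStep (s : Option String × Option String × Option String) (fn : String) :
    Option String × Option String × Option String :=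
  ( (match s.1 with
     | none => if PySem.Str.isIn "ecid" fn then some fn else none
     | some x => some x),
    (match s.2.1 with
     | none => if PySem.Str.isIn "email" fn then some fn else none
     | some x => some x),
    (match s.2.2 with
     | none => if PySem.Str.isIn "crm" fn || PySem.Str.isIn "customer_id" fn || PySem.Str.isIn "user_id" fn then some fn else none
     | some x => some x) )

def infer_primary_identity_py_alt (field_names : List String) (cls : String) : Option (List (String × String)) :=
  let s := field_names.foldl pvStep (none, none, none)
  match s with
  | (firstEcid, firstEmail, firstCrm) =>
    if cls == "experienceevent" && firstEcid.isSome then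
      some [("field", firstEcid.getD ""), ("namespace", "ECID")]
    else if firstEmail.isSome then
      some [("field", firstEmail.getD ""), ("namespace", "Email")]
    else if firstCrm.isSome then
      some [("field", firstCrm.getD ""), ("namespace", "CRM_ID")]
    else none

-- ===== PRECONDITION & SPEC =====
def Spec_infer_primary_identity_py (field_names : List String) (cls : String) (out : Option (List (String × String))) : Prop := out = infer_primary_identity_py_alt field_names cls
instance (field_names : List String) (cls : String) (out : Option (List (String × String))) : Decidable (Spec_infer_primary_identity_py field_names cls out) := by unfold Spec_infer_primary_identity_py; infer_instance

-- ===== CLAIM (what is proved, stated in full; the proofs are below) =====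
def Claim_equal_infer_primary_identity_py : Prop := ∀ (field_names : List String) (cls : String), Dom_infer_primary_identity_py field_names cls → Spec_infer_primary_identity_py field_names cls (infer_primary_identity_py field_names cls)

-- ===== LEMMAS AND PROOFS =====

/-- One slot update: keep the slot if set, else take the current field if it matches. -/
def pvSlot (o : Option String) (p : String → Bool) (x : String) : Option String :=
  match o with
  | none => if p x then some x else none
  | some y => some y

theorem pvStep_eq (s : Option String × Option String × Option String) (fn : String) :
    pvStep s fn =
      ( pvSlot s.1 (fun fn => PySem.Str.isIn "ecid" fn) fn,
        pvSlot s.2.1 (fun fn => PySem.Str.isIn "email" fn) fn,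
        pvSlot s.2.2 (fun fn => PySem.Str.isIn "crm" fn || PySem.Str.isIn "customer_id" fn || PySem.Str.isIn "user_id" fn) fn ) := rfl

/-- The triple fold splits into three independent slot folds. -/
theorem pvFold_split (xs : List String) (a b c : Option String) :
    xs.foldl pvStep (a, b, c) =
      ( xs.foldl (fun o x => pvSlot o (fun fn => PySem.Str.isIn "ecid" fn) x) a,
        xs.foldl (fun o x => pvSlot o (fun fn => PySem.Str.isIn "email" fn) x) b,
        xs.foldl (fun o x => pvSlot o (fun fn => PySem.Str.isIn "crm" fn || PySem.Str.isIn "customer_id" fn || PySem.Str.isIn "user_id" fn) x) c ) := by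
  induction xs generalizing a b c with
  | nil => rfl
  | cons x xs ih => simp only [List.foldl_cons, pvStep_eq, ih]

/-- A slot fold from an empty slot is the first match. -/
theorem pvSlot_fold_find (p : String → Bool) (xs : List String) (a : Option String) :
    xs.foldl (fun o x => pvSlot o p x) a = a.or (xs.find? p) := by
  induction xs generalizing a with
  | nil => cases a <;> rfl
  | cons x xs ih =>
    simp only [List.foldl_cons, ih, List.find?_cons]
    cases a with
    | some y => rfl
    | none => by_cases hp : p x <;> simp [pvSlot, hp]

theorem infer_primary_identity_py_spec' (field_names : List String) (cls : String) :
    infer_primary_identity_py field_names cls = infer_primary_identity_py_alt field_names cls := by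
  unfold infer_primary_identity_py infer_primary_identity_py_alt
  rw [pvFold_split, pvSlot_fold_find, pvSlot_fold_find, pvSlot_fold_find]
  simp only [Option.or]
  rcases h1 : field_names.find? (fun fn => PySem.Str.isIn "ecid" fn) with _ | e <;>
  rcases h2 : field_names.find? (fun fn => PySem.Str.isIn "email" fn) with _ | m <;>
  rcases h3 : field_names.find? (fun fn => PySem.Str.isIn "crm" fn || PySem.Str.isIn "customer_id" fn || PySem.Str.isIn "user_id" fn) with _ | r <;>
  by_cases hc : cls == "experienceevent" <;>
  simp [hc]

-- ===== VERDICT (by name: the statement is the Claim_ definition above) =====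
theorem infer_primary_identity_py_spec : Claim_equal_infer_primary_identity_py := by
  intro field_names cls _
  exact infer_primary_identity_py_spec' field_names cls
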